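-- pv_equiv track=rewrite | github.com/johanzander/bess-manager | core/bess/health_check.py | determine_health_status
-- ===== SOURCE A (Python) =====
-- def determine_health_status(
--     health_check_results: list,
--     working_sensors: int,
--     required_methods: list | None = None,
-- ) -> str:
--     """Generic method to determine health check status based on required vs optional sensors.
--
--     Args:
--         health_check_results: List of health check results (after method calls)
--         working_sensors: Count of working sensors (unused, kept for compatibility)
--         required_methods: List of method names that are required (optional sensors are non-required)
--
--     Returns:
--         Status string: "OK", "WARNING", or "ERROR"
--     """
--     if not required_methods:
--         # If no required methods specified, all methods are optional
--         required_methods = []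
--
--     # Count required vs optional sensors that are actually working
--     required_working = 0
--     required_total = 0
--     optional_working = 0
--     optional_total = 0
--
--     for check_result in health_check_results:
--         method_name = check_result.get("method_name", "unknown")
--         # A sensor is working if it has status "OK" after method call testing
--         is_working = check_result.get("status") == "OK"
--
--         if method_name in required_methods:
--             required_total += 1
--             if is_working:
--                 required_working += 1
--         else:
--             optional_total += 1
--             if is_working:
--                 optional_working += 1
--
--     # ERROR if not all required sensors are working
--     # WARNING if any optional sensor is not working
--     # OK if all sensors are working
--     if required_working < required_total:
--         return "ERROR"
--     elif optional_working < optional_total: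
--         return "WARNING"
--     else:
--         return "OK"
-- ===== SOURCE B (Python) =====
-- def determine_health_status(
--     health_check_results: list,
--     working_sensors: int,
--     required_methods: list | None = None,
-- ) -> str:
--     """Classify health as OK/WARNING/ERROR by required vs optional sensors."""
--     req = set(required_methods or [])
--     required = [r for r in health_check_results
--                 if r.get("method_name", "unknown") in req]
--     optional = [r for r in health_check_results
--                 if r.get("method_name", "unknown") not in req]
--     if not all(r.get("status") == "OK" for r in required):
--         return "ERROR"
--     if not all(r.get("status") == "OK" for r in optional):
--         return "WARNING"
--     return "OK"
-- ===== Notes on version B (the rewrite author's own statement) =====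
-- stated objective: simpler
-- what changed: Replaces the four-counter single loop with list membership tests by a membership set, an explicit partition of the results into required/optional lists, and two all(...) predicates deciding ERROR/WARNING/OK.
import Mathlib
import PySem

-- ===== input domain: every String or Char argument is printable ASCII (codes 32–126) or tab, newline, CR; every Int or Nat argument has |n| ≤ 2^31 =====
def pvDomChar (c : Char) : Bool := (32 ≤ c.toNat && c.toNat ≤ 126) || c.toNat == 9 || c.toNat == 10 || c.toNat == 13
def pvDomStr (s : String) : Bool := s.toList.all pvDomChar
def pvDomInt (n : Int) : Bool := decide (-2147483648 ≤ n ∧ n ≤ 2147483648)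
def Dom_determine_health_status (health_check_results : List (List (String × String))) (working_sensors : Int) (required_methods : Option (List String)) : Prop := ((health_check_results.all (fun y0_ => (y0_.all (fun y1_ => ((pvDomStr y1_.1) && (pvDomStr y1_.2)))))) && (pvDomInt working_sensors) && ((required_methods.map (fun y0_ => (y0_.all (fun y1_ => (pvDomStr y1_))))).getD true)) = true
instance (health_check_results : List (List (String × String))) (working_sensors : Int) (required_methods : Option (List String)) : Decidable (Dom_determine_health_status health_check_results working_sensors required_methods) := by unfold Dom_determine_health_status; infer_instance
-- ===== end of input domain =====

-- ===== PORT A =====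
-- Transliteration of A: normalize falsy required_methods, one foldl maintaining the
-- four counters (required_working, required_total, optional_working, optional_total),
-- then the three-way comparison.
def determine_health_status (health_check_results : List (List (String × String))) (working_sensors : Int) (required_methods : Option (List String)) : String :=
  let req : List String :=
    match required_methods with
    | none => []
    | some l => if l.isEmpty then [] else l
  let st : Int × Int × Int × Int :=
    health_check_results.foldl
      (fun acc check_result =>
        let method_name := (List.lookup "method_name" check_result).getD "unknown"
        let is_working := (List.lookup "status" check_result) == some "OK"
        if method_name ∈ req then
          (acc.1 + (if is_working then 1 else 0), acc.2.1 + 1, acc.2.2.1, acc.2.2.2)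
        else
          (acc.1, acc.2.1, acc.2.2.1 + (if is_working then 1 else 0), acc.2.2.2 + 1))
      (0, 0, 0, 0)
  if st.1 < st.2.1 then "ERROR"
  else if st.2.2.1 < st.2.2.2 then "WARNING"
  else "OK"

-- ===== PORT B =====
-- Transliteration of B: a membership set, a partition into required/optional lists,
-- and two all-OK predicates. RETURN value equivalence only; neither program mutates.
def pvMethodName (r : List (String × String)) : String :=
  (List.lookup "method_name" r).getD "unknown"

def pvIsOK (r : List (String × String)) : Bool :=
  (List.lookup "status" r) == some "OK"

def determine_health_status_alt (health_check_results : List (List (String × String))) (working_sensors : Int) (required_methods : Option (List String)) : String :=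
  let req : PySem.Set String := PySem.Set.ofList (required_methods.getD [])
  let required := health_check_results.filter (fun r => decide (pvMethodName r ∈ req))
  let optional := health_check_results.filter (fun r => !decide (pvMethodName r ∈ req))
  if ¬ (required.all pvIsOK) then "ERROR"
  else if ¬ (optional.all pvIsOK) then "WARNING"
  else "OK"

-- ===== PRECONDITION & SPEC =====
def Spec_determine_health_status (health_check_results : List (List (String × String))) (working_sensors : Int) (required_methods : Option (List String)) (out : String) : Prop := out = determine_health_status_alt health_check_results working_sensors required_methods
instance (health_check_results : List (List (String × String))) (working_sensors : Int) (required_methods : Option (List String)) (out : String) : Decidable (Spec_determine_health_status health_check_results working_sensors required_methods out) := by unfold Spec_determine_health_status; infer_instance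

-- ===== CLAIM (what is proved, stated in full; the proofs are below) =====
def Claim_equal_determine_health_status : Prop := ∀ (health_check_results : List (List (String × String))) (working_sensors : Int) (required_methods : Option (List String)), Dom_determine_health_status health_check_results working_sensors required_methods → Spec_determine_health_status health_check_results working_sensors required_methods (determine_health_status health_check_results working_sensors required_methods)

-- ===== LEMMAS AND PROOFS =====

-- ===== VERDICT (by name: the statement is the Claim_ definition above) =====
theorem pv_fold_counts (l : List (List (String × String))) (p : List (String × String) → Bool)
    (a b c d : Int) :
    l.foldl
      (fun acc check_result =>
        let method_name := (List.lookup "method_name" check_result).getD "unknown"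
        let is_working := (List.lookup "status" check_result) == some "OK"
        if p check_result then
          (acc.1 + (if is_working then 1 else 0), acc.2.1 + 1, acc.2.2.1, acc.2.2.2)
        else
          (acc.1, acc.2.1, acc.2.2.1 + (if is_working then 1 else 0), acc.2.2.2 + 1))
      (a, b, c, d)
    = (a + ((l.filter p).countP pvIsOK : Int),
       b + ((l.filter p).length : Int),
       c + ((l.filter (fun r => !p r)).countP pvIsOK : Int),
       d + ((l.filter (fun r => !p r)).length : Int)) := by
  induction l generalizing a b c d with
  | nil => simp
  | cons x xs ih =>
      simp only [List.foldl_cons]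
      by_cases hx : p x = true
      · rw [if_pos hx, ih, List.filter_cons_of_pos hx,
          List.filter_cons_of_neg (by simp [hx]), List.countP_cons, List.length_cons]
        simp only [pvIsOK]
        split <;> push_cast <;> ring
      · rw [if_neg hx, ih, List.filter_cons_of_neg (by simp [hx]),
          List.filter_cons_of_pos (by simp [hx]), List.countP_cons, List.length_cons]
        simp only [pvIsOK]
        split <;> push_cast <;> ring

theorem pv_count_lt (l : List (List (String × String))) :
    (((l.countP pvIsOK : Int) < (l.length : Int)) ↔ ¬ (l.all pvIsOK = true)) := by
  have hle := List.countP_le_length (p := pvIsOK) (l := l)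
  have h : l.countP pvIsOK = l.length ↔ l.all pvIsOK = true := by
    rw [List.all_eq_true]
    exact List.countP_eq_length
  rw [← h]
  omega

-- the two bodies agree once the required-method list is fixed
theorem pv_core (hcr : List (List (String × String))) (reqL : List String) :
    (let st : Int × Int × Int × Int :=
      hcr.foldl
        (fun acc check_result =>
          let method_name := (List.lookup "method_name" check_result).getD "unknown"
          let is_working := (List.lookup "status" check_result) == some "OK"
          if method_name ∈ reqL then
            (acc.1 + (if is_working then 1 else 0), acc.2.1 + 1, acc.2.2.1, acc.2.2.2)
          else
            (acc.1, acc.2.1, acc.2.2.1 + (if is_working then 1 else 0), acc.2.2.2 + 1))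
        (0, 0, 0, 0)
      if st.1 < st.2.1 then "ERROR"
      else if st.2.2.1 < st.2.2.2 then "WARNING"
      else "OK")
    = (if ¬ ((hcr.filter (fun r => decide (pvMethodName r ∈ PySem.Set.ofList reqL))).all pvIsOK) then "ERROR"
       else if ¬ ((hcr.filter (fun r => !decide (pvMethodName r ∈ PySem.Set.ofList reqL))).all pvIsOK) then "WARNING"
       else "OK") := by
  have hmem : ∀ r : List (String × String),
      (decide (((List.lookup "method_name" r).getD "unknown") ∈ reqL))
      = decide (pvMethodName r ∈ PySem.Set.ofList reqL) := by
    intro r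
    simp [pvMethodName, PySem.Set.mem_ofList]
  have hfold := pv_fold_counts hcr
    (fun r => decide (((List.lookup "method_name" r).getD "unknown") ∈ reqL)) 0 0 0 0
  simp only [decide_eq_true_eq] at hfold
  simp only []
  rw [hfold]
  have hmem' : ∀ r : List (String × String),
      (!decide (((List.lookup "method_name" r).getD "unknown") ∈ reqL))
      = !decide (pvMethodName r ∈ PySem.Set.ofList reqL) := fun r => by rw [hmem r]
  simp only [List.filter_congr (fun r _ => hmem r), List.filter_congr (fun r _ => hmem' r), zero_add]
  have h1 := pv_count_lt (hcr.filter (fun r => decide (pvMethodName r ∈ PySem.Set.ofList reqL)))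
  have h2 := pv_count_lt (hcr.filter (fun r => !decide (pvMethodName r ∈ PySem.Set.ofList reqL)))
  simp only [h1, h2]

theorem determine_health_status_spec : Claim_equal_determine_health_status := by
  intro hcr ws rm _
  unfold Spec_determine_health_status determine_health_status determine_health_status_alt
  cases rm with
  | none => exact pv_core hcr []
  | some l =>
      cases l with
      | nil => exact pv_core hcr []
      | cons h t => exact pv_core hcr (h :: t)
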